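-- pv_equiv track=rewrite | github.com/Jaiashar/vora-business-finder | uga_scraper.py | is_admin_email
-- ===== SOURCE A (Python) =====
-- def is_admin_email(email):
--     """Filter out department/admin/generic emails."""
--     admin_patterns = [
--         'info@', 'admin@', 'office@', 'dept@', 'webmaster@', 'help@',
--         'support@', 'contact@', 'registrar@', 'grad@', 'gradoffice@',
--         'department@', 'chair@', 'advising@', 'undergrad@', 'dean@',
--         'reception@', 'main@', 'general@', 'staff@', 'gradadmit@',
--         'calendar@', 'events@', 'news@', 'newsletter@', 'web@',
--         'marketing@', 'media@', 'communications@', 'hr@', 'hiring@',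
--         'jobs@', 'career@', 'alumni@', 'development@', 'giving@',
--         'feedback@', 'safety@', 'security@', 'facilities@', 'it@',
--         'tech@', 'helpdesk@', 'library@', 'gradapp@', 'apply@',
--         'admission@', 'admissions@', 'gradschool@', 'finaid@',
--         'testing@', 'counseling@', 'housing@', 'parking@', 'transit@',
--         'police@', 'records@', 'bursar@', 'payroll@', 'ugagrad@',
--     ]
--     email_lower = email.lower()
--     return any(email_lower.startswith(p) for p in admin_patterns)
-- ===== SOURCE B (Python) =====
-- # B: the admin words live in one comma-separated string split once at import time;
-- # lookup lowercases once, partitions the local part off at the first '@' and does a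
-- # single set-membership test instead of scanning the 59 admin prefixes.
-- _ADMIN_LOCALS = frozenset(
--     "info,admin,office,dept,webmaster,help,support,contact,registrar,grad,"
--     "gradoffice,department,chair,advising,undergrad,dean,reception,main,"
--     "general,staff,gradadmit,calendar,events,news,newsletter,web,marketing,"
--     "media,communications,hr,hiring,jobs,career,alumni,development,giving,"
--     "feedback,safety,security,facilities,it,tech,helpdesk,library,gradapp,"
--     "apply,admission,admissions,gradschool,finaid,testing,counseling,housing,"
--     "parking,transit,police,records,bursar,payroll,ugagrad".split(","))
--
-- def is_admin_email(email):
--     """Filter out department/admin/generic emails."""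
--     local, sep, _rest = email.lower().partition('@')
--     return sep == '@' and local in _ADMIN_LOCALS
-- ===== Notes on version B (the rewrite author's own statement) =====
-- stated objective: simpler
-- what changed: Instead of scanning all 59 admin prefixes with startswith, B keeps the bare admin words as a set built by splitting one comma-separated string, lowercases the input once, splits the local part off before the first at-sign with partition, and does a single set-membership test.
import Mathlib
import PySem

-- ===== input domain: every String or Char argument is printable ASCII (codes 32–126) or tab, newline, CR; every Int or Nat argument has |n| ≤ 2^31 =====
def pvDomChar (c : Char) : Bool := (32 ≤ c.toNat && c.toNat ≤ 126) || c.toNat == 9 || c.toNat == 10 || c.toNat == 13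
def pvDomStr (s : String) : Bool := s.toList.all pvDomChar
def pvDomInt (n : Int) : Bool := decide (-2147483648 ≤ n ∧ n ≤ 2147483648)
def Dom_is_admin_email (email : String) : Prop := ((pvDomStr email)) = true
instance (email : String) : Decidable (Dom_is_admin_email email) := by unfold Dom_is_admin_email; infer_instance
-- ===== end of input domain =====

set_option maxRecDepth 40000
set_option maxHeartbeats 1600000


-- B replaces A's scan of the 59 admin prefixes by a word table split from one CSV
-- string and a single membership test on the local part before the first '@'
-- (objective: simpler).

-- ===== PORT A =====
def adminPatterns : List String :=
  ["info@", "admin@", "office@", "dept@", "webmaster@", "help@",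
   "support@", "contact@", "registrar@", "grad@", "gradoffice@",
   "department@", "chair@", "advising@", "undergrad@", "dean@",
   "reception@", "main@", "general@", "staff@", "gradadmit@",
   "calendar@", "events@", "news@", "newsletter@", "web@",
   "marketing@", "media@", "communications@", "hr@", "hiring@",
   "jobs@", "career@", "alumni@", "development@", "giving@",
   "feedback@", "safety@", "security@", "facilities@", "it@",
   "tech@", "helpdesk@", "library@", "gradapp@", "apply@",
   "admission@", "admissions@", "gradschool@", "finaid@",
   "testing@", "counseling@", "housing@", "parking@", "transit@",
   "police@", "records@", "bursar@", "payroll@", "ugagrad@"]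

def is_admin_email (email : String) : Bool :=
  let email_lower := PySem.Str.lower email
  adminPatterns.any (fun p => PySem.Str.startswith email_lower p)

-- ===== PORT B =====
-- the one comma-separated word table Source B splits at import time
def adminWordCsv : String :=
  "info,admin,office,dept,webmaster,help,support,contact,registrar,grad,gradoffice,department,chair,advising,undergrad,dean,reception,main,general,staff,gradadmit,calendar,events,news,newsletter,web,marketing,media,communications,hr,hiring,jobs,career,alumni,development,giving,feedback,safety,security,facilities,it,tech,helpdesk,library,gradapp,apply,admission,admissions,gradschool,finaid,testing,counseling,housing,parking,transit,police,records,bursar,payroll,ugagrad"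

-- frozenset("...".split(",")): the split words, held as char lists for the lookup
def adminLocals : List (List Char) :=
  PySem.Chars.splitOn adminWordCsv.toList [',']

-- partition('@'): the local part is everything before the first '@'; the separator
-- was found iff '@' occurs in the string.
def is_admin_email_alt (email : String) : Bool :=
  let cs := (PySem.Str.lower email).toList
  let localPart := cs.takeWhile (· ≠ '@')
  cs.contains '@' && adminLocals.contains localPart

-- ===== PRECONDITION & SPEC =====
def Spec_is_admin_email (email : String) (out : Bool) : Prop := out = is_admin_email_alt email
instance (email : String) (out : Bool) : Decidable (Spec_is_admin_email email out) := by unfold Spec_is_admin_email; infer_instance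

-- ===== CLAIM (what is proved, stated in full; the proofs are below) =====
def Claim_equal_is_admin_email : Prop := ∀ (email : String), Dom_is_admin_email email → Spec_is_admin_email email (is_admin_email email)

-- ===== LEMMAS AND PROOFS =====

-- the split evaluated once, so the table lemmas below do not re-run splitOn
lemma adminLocals_eval : adminLocals = ["info".toList, "admin".toList, "office".toList, "dept".toList, "webmaster".toList, "help".toList, "support".toList, "contact".toList, "registrar".toList, "grad".toList, "gradoffice".toList, "department".toList, "chair".toList, "advising".toList, "undergrad".toList, "dean".toList, "reception".toList, "main".toList, "general".toList, "staff".toList, "gradadmit".toList, "calendar".toList, "events".toList, "news".toList, "newsletter".toList, "web".toList, "marketing".toList, "media".toList, "communications".toList, "hr".toList, "hiring".toList, "jobs".toList, "career".toList, "alumni".toList, "development".toList, "giving".toList, "feedback".toList, "safety".toList, "security".toList, "facilities".toList, "it".toList, "tech".toList, "helpdesk".toList, "library".toList, "gradapp".toList, "apply".toList, "admission".toList, "admissions".toList, "gradschool".toList, "finaid".toList, "testing".toList, "counseling".toList, "housing".toList, "parking".toList, "transit".toList, "police".toList, "records".toList, "bursar".toList, "payroll".toList, "ugagrad".toList] :=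 by decide

-- A pattern "w@" is a prefix of cs iff cs's pre-'@' part is exactly w and '@' occurs.
lemma startswith_word_at (cs w : List Char) (hw : '@' ∉ w) :
    PySem.Chars.startswith cs (w ++ ['@'])
      = (decide (cs.takeWhile (· ≠ '@') = w) && cs.contains '@') := by
  rw [Bool.eq_iff_iff]
  simp only [PySem.Chars.startswith_iff, Bool.and_eq_true, decide_eq_true_eq,
    List.contains_eq_mem]
  constructor
  · rintro ⟨t, rfl⟩
    rw [List.append_assoc]
    constructor
    · rw [List.takeWhile_append_of_pos]
      · simp
      · intro a ha
        simp only [ne_eq, decide_eq_true_eq]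
        intro h; exact hw (h ▸ ha)
    · simp
  · rintro ⟨h1, h2⟩
    rcases hd : cs.dropWhile (· ≠ '@') with _ | ⟨c, t⟩
    · exfalso
      have hall := List.dropWhile_eq_nil_iff.1 hd '@' h2
      simp at hall
    · have hne : cs.dropWhile (· ≠ '@') ≠ [] := by rw [hd]; simp
      have hc : c = '@' := by
        have h := List.head_dropWhile_not (p := fun x => decide (x ≠ '@')) (l := cs) hne
        simp only [hd, List.head_cons] at h
        simpa using h
      refine ⟨t, ?_⟩
      conv_rhs => rw [← List.takeWhile_append_dropWhile (p := fun x => decide (x ≠ '@')) (l := cs)]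
      rw [h1, hd, hc, List.append_assoc]
      rfl

lemma adminPatterns_eq : adminPatterns = adminLocals.map (fun w => String.ofList (w ++ ['@'])) := by
  decide

lemma adminLocals_no_at : ∀ w ∈ adminLocals, '@' ∉ w := by rw [adminLocals_eval]; decide

-- ===== VERDICT (by name: the statement is the Claim_ definition above) =====
theorem is_admin_email_spec : Claim_equal_is_admin_email := by
  intro email _
  unfold Spec_is_admin_email is_admin_email is_admin_email_alt
  rw [Bool.eq_iff_iff]
  simp only [adminPatterns_eq, List.any_map, List.any_eq_true, Function.comp,
    PySem.Str.startswith_eq, PySem.Str.toList_lower, String.toList_ofList, Bool.and_eq_true,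
    List.contains_eq_mem, decide_eq_true_eq]
  constructor
  · rintro ⟨w, hw, hsw⟩
    rw [startswith_word_at _ _ (adminLocals_no_at w hw)] at hsw
    simp only [Bool.and_eq_true, decide_eq_true_eq, List.contains_eq_mem] at hsw
    exact ⟨hsw.2, hsw.1 ▸ hw⟩
  · rintro ⟨h2, hloc⟩
    refine ⟨_, hloc, ?_⟩
    rw [startswith_word_at _ _ (adminLocals_no_at _ hloc)]
    simp only [Bool.and_eq_true, decide_eq_true_eq, List.contains_eq_mem]
    exact ⟨trivial, h2⟩
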